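-- pv_equiv track=rewrite | github.com/jaydeelew/leet_python311 | 0_CountNumsToXwithDigitSumY.py | countNumbers_2
-- ===== SOURCE A (Python) =====
-- from functools import cache
--
-- def countNumbers_2(num, target):
--     # Convert input number to list of digits for processing
--     digits = list(map(int, str(num)))
--     num_len = len(digits)
--
--     @cache  # Memoize results to avoid recomputing same subproblems
--     def dp(digit_pos, bounded, curr_sum):
--         # Base case: if we've processed all digits
--         if digit_pos == num_len:
--             return 1 if curr_sum == target else 0
--
--         ans = 0
--         # If bounded is True, we can only use digits up to digits[digit_pos]
--         # If bounded is False, we can use any digit from 0-9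
--         max_digit = digits[digit_pos] if bounded else 9
--
--         # Try each valid digit at current position
--         for d in range(0, max_digit + 1):
--             # If adding this digit would exceed target sum, we can break
--             # since all subsequent digits will also exceed the target
--             if curr_sum + d > target:
--                 break
--
--             # Recursively count valid numbers:
--             # - Move to next position (digit_pos + 1)
--             # - Update bounded flag: remains bounded only if we're already bounded AND using max digit
--             # - Add current digit to running sum
--             new_bounded = bounded and (d == max_digit)
--             ans += dp(digit_pos + 1, new_bounded, curr_sum + d)
--
--         return ans
--
--     # Start with position 0, bounded constraint True, and sum 0
--     return dp(0, True, 0)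
-- ===== SOURCE B (Python) =====
-- def countNumbers_2(num, target):
--     digits = [int(c) for c in str(num)]
--     smax = 9 * len(digits)
--     base = sum(digits)
--     res = 1 if base == target else 0
--     # row[s] = number of k-digit strings (digits 0-9) whose digits sum to s; k starts at 0
--     row = [1] + [0] * smax
--     suffix = 0
--     for dig in reversed(digits):
--         prefix = base - suffix - dig
--         for d in range(dig):
--             r = target - prefix - d
--             if 0 <= r <= smax:
--                 res += row[r]
--         suffix += dig
--         row = [sum(row[s - d] for d in range(10) if s - d >= 0)
--                for s in range(smax + 1)]
--     return res
-- ===== Notes on version B (the rewrite author's own statement) =====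
-- stated objective: alternative
-- what changed: Replaces A's memoized top-down bounded digit DP (recursion over position/bounded/current-sum with an early break) by a bottom-up table of 'count of k-digit strings with digit sum s', updated by one 0-9 convolution per position during a single right-to-left pass over the digits, plus 1 if num's own digit sum hits the target.
import Mathlib
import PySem

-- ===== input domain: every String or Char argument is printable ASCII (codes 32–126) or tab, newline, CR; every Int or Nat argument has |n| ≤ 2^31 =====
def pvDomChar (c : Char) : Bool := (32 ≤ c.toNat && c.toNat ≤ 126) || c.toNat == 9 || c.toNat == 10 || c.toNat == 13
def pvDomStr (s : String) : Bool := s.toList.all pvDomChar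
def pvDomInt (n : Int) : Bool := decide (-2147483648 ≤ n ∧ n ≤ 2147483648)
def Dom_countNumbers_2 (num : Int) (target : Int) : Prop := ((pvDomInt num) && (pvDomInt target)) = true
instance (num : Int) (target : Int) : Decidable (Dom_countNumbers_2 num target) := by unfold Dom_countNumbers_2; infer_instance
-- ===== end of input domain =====

-- B replaces A's memoized top-down bounded digit DP by a bottom-up "count of k-digit
-- strings with digit sum s" row that is convolved once per position during a single
-- right-to-left pass over the digits (objective: alternative algorithm, similar cost).

-- ===== PORT A =====
-- digits = list(map(int, str(num))) — shared by both Pythons verbatim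
def pvDigit (c : Char) : Int := (PySem.Int.ofStr? (String.singleton c)).getD 0
def pvDigits (num : Int) : List Int := (PySem.Int.toStr num).toList.map pvDigit

-- @cache: the memo dict (keyed like Python's cache on (digit_pos, bounded, curr_sum);
-- digit_pos is represented by the length of the remaining suffix) is threaded through
abbrev pvMemo := PySem.Dict (Int × Bool × Int) Int

mutual
-- dp(digit_pos, bounded, curr_sum): digit_pos ↦ the suffix `rest` of the digit list
def pvDpAM (target : Int) (rest : List Int) (bounded : Bool) (currSum : Int) (memo : pvMemo) :
    Int × pvMemo :=
  match PySem.Dict.get? memo ((rest.length : Int), bounded, currSum) with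
  | some v => (v, memo)
  | none =>
    let r :=
      match rest with
      | [] => ((if currSum == target then 1 else 0 : Int), memo)
      | dcur :: tail =>
        let maxDigit := if bounded then dcur else 9
        pvDpInnerM target tail bounded currSum maxDigit (PySem.List.pyRange 0 (maxDigit + 1)) memo
    (r.1, PySem.Dict.insert r.2 ((rest.length : Int), bounded, currSum) r.1)
  termination_by (rest.length, 0)
-- the `for d in range(0, max_digit+1)` loop with its break (`if curr_sum + d > target: break`)
def pvDpInnerM (target : Int) (tail : List Int) (bounded : Bool) (currSum : Int)
    (maxDigit : Int) (ds : List Int) (memo : pvMemo) : Int × pvMemo :=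
  match ds with
  | [] => (0, memo)
  | d :: ds' =>
    if currSum + d > target then (0, memo)
    else
      let p1 := pvDpAM target tail (bounded && (d == maxDigit)) (currSum + d) memo
      let p2 := pvDpInnerM target tail bounded currSum maxDigit ds' p1.2
      (p1.1 + p2.1, p2.2)
  termination_by (tail.length, ds.length)
end

def countNumbers_2 (num : Int) (target : Int) : Int :=
  (pvDpAM target (pvDigits num) true 0 PySem.Dict.empty).1

-- ===== PORT B =====
-- loop body of B's single right-to-left pass (state = (suffix, row, res))
def pvStep (target base smax : Int) (st : Int × List Int × Int) (dig : Int) :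
    Int × List Int × Int :=
  let suffix := st.1
  let row := st.2.1
  let res := st.2.2
  let pref := base - suffix - dig
  let res1 := (PySem.List.pyRange 0 dig).foldl (fun acc d =>
      let r := target - pref - d
      if 0 ≤ r ∧ r ≤ smax then acc + row.getD r.toNat 0 else acc) res
  let row1 := (PySem.List.pyRange 0 (smax + 1)).map (fun s =>
      ((PySem.List.pyRange 0 10).filter (fun d => 0 ≤ s - d)).foldl
        (fun acc d => acc + row.getD (s - d).toNat 0) 0)
  (suffix + dig, row1, res1)

def countNumbers_2_alt (num : Int) (target : Int) : Int :=
  let digits := pvDigits num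
  let smax : Int := 9 * (digits.length : Int)
  let base : Int := digits.sum
  let res0 : Int := if base == target then 1 else 0
  let row0 : List Int := 1 :: List.replicate (9 * digits.length) 0
  (digits.reverse.foldl (pvStep target base smax) (0, row0, res0)).2.2

-- ===== PRECONDITION & SPEC =====
-- Python A raises ValueError for num < 0 (int('-') while mapping over str(num)); B raises there too.
def Pre_countNumbers_2 (num : Int) (target : Int) : Prop := 0 ≤ num
instance (num : Int) (target : Int) : Decidable (Pre_countNumbers_2 num target) := by
  unfold Pre_countNumbers_2; infer_instance
def pvWitness_countNumbers_2 : Int × Int := (12, 3)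

def Spec_countNumbers_2 (num : Int) (target : Int) (out : Int) : Prop := out = countNumbers_2_alt num target
instance (num : Int) (target : Int) (out : Int) : Decidable (Spec_countNumbers_2 num target out) := by unfold Spec_countNumbers_2; infer_instance

-- ===== CLAIM (what is proved, stated in full; the proofs are below) =====
def Claim_equal_countNumbers_2 : Prop := ∀ (num : Int) (target : Int), Dom_countNumbers_2 num target → Pre_countNumbers_2 num target → Spec_countNumbers_2 num target (countNumbers_2 num target)

-- ===== LEMMAS AND PROOFS =====

-- proof-side reference: A's dp without the memo dict
mutual
def pvDpA (target : Int) (rest : List Int) (bounded : Bool) (currSum : Int) : Int :=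
  match rest with
  | [] => if currSum == target then 1 else 0
  | dcur :: tail =>
    let maxDigit := if bounded then dcur else 9
    pvDpInner target tail bounded currSum maxDigit (PySem.List.pyRange 0 (maxDigit + 1) 1)
  termination_by (rest.length, 0)
def pvDpInner (target : Int) (tail : List Int) (bounded : Bool) (currSum : Int)
    (maxDigit : Int) (ds : List Int) : Int :=
  match ds with
  | [] => 0
  | d :: ds' =>
    if currSum + d > target then 0
    else pvDpA target tail (bounded && (d == maxDigit)) (currSum + d) +
         pvDpInner target tail bounded currSum maxDigit ds'
  termination_by (tail.length, ds.length)
end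



-- int(c) for a single character never parses to a negative value
theorem pvOptNonneg (o : Option Nat) :
    0 ≤ (o.bind (fun a => some ((a : Int)))).getD 0 := by
  cases o <;> simp

theorem pvDigit_nonneg (c : Char) : 0 ≤ pvDigit c := by
  unfold pvDigit
  have h : String.singleton c = String.ofList [c] := rfl
  rw [h, PySem.Int.ofStr?_ofList]
  unfold PySem.Int.ofChars?
  by_cases hs : PySem.Int.isIntSpace c
  · simp [hs]; exact pvOptNonneg _
  · simp [hs]; split
    case h_1 _ ds heq => injection heq with h1 h2; subst h2; decide
    case h_2 _ ds heq => injection heq with h1 h2; subst h2; decide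
    all_goals exact pvOptNonneg _

-- number of k-digit strings (digits 0..9) whose digit sum is r
def fcount : Nat → Int → Int
  | 0, r => if r = 0 then 1 else 0
  | (k+1), r => ((List.range 10).map (fun d : Nat => fcount k (r - (d : Int)))).sum

theorem fcount_neg (k : Nat) : ∀ r : Int, r < 0 → fcount k r = 0 := by
  induction k with
  | zero => intro r hr; simp [fcount]; omega
  | succ k ih =>
    intro r hr
    simp only [fcount]
    apply List.sum_eq_zero
    intro x hx
    simp only [List.mem_map] at hx
    obtain ⟨d, _, rfl⟩ := hx
    refine ih _ ?_
    have hd0 : (0:Int) ≤ (d:Int) := Int.natCast_nonneg d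
    omega

theorem fcount_gt (k : Nat) : ∀ r : Int, (9 * k : Int) < r → fcount k r = 0 := by
  induction k with
  | zero => intro r hr; simp [fcount]; omega
  | succ k ih =>
    intro r hr
    simp only [fcount]
    apply List.sum_eq_zero
    intro x hx
    simp only [List.mem_map, List.mem_range] at hx
    obtain ⟨d, hd, rfl⟩ := hx
    apply ih
    have hd9 : (d:Int) ≤ 9 := by exact_mod_cast Nat.lt_succ_iff.mp hd
    push_cast at hr ⊢
    omega

-- A's inner loop returns 0 once the break condition holds for every candidate
theorem pvDpInner_zero (target : Int) (tail : List Int) (b : Bool) (s m : Int) :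
    ∀ ds : List Int, (∀ d ∈ ds, target < s + d) → pvDpInner target tail b s m ds = 0 := by
  intro ds
  induction ds with
  | nil => intro _; simp [pvDpInner]
  | cons d ds' ih =>
    intro h
    have hd : target < s + d := h d (by simp)
    simp only [pvDpInner, if_pos (by omega : s + d > target)]

theorem pvDpA_zero (target : Int) (rest : List Int) (b : Bool) (s : Int)
    (hs : target < s) : pvDpA target rest b s = 0 := by
  cases rest with
  | nil => simp only [pvDpA]; simp; omega
  | cons dcur tail =>
    simp only [pvDpA]
    apply pvDpInner_zero
    intro d hd
    have := (PySem.List.mem_pyRange_one.mp hd).1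
    omega

-- the break-terminated loop equals the full sum over a sorted candidate list
theorem pvDpInner_sum (target : Int) (tail : List Int) (b : Bool) (s m : Int) :
    ∀ ds : List Int, List.Pairwise (· ≤ ·) ds →
    pvDpInner target tail b s m ds =
      (ds.map (fun d => pvDpA target tail (b && (d == m)) (s + d))).sum := by
  intro ds
  induction ds with
  | nil => intro _; simp [pvDpInner]
  | cons d ds' ih =>
    intro hsorted
    have hle : ∀ x ∈ ds', d ≤ x := fun x hx => (List.pairwise_cons.mp hsorted).1 x hx
    have hs' : List.Pairwise (· ≤ ·) ds' := (List.pairwise_cons.mp hsorted).2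
    simp only [pvDpInner]
    by_cases hbreak : s + d > target
    · rw [if_pos hbreak]
      symm
      apply List.sum_eq_zero
      intro x hx
      simp only [List.mem_map, List.mem_cons] at hx
      obtain ⟨e, he, rfl⟩ := hx
      rcases he with rfl | he
      · exact pvDpA_zero _ _ _ _ (by omega)
      · exact pvDpA_zero _ _ _ _ (by have := hle e he; omega)
    · rw [if_neg hbreak, ih hs', List.map_cons, List.sum_cons]

theorem pyRange_sorted_aux (n : Nat) : ∀ (a b : Int), (b - a).toNat ≤ n →
    List.Pairwise (· ≤ ·) (PySem.List.pyRange a b) := by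
  induction n with
  | zero =>
    intro a b h
    have hba : ¬ a < b := by omega
    have : PySem.List.pyRange a b = [] := by
      apply List.eq_nil_iff_forall_not_mem.mpr
      intro x hx
      have := PySem.List.mem_pyRange_one.mp hx
      omega
    simp [this]
  | succ n ih =>
    intro a b h
    by_cases hab : a < b
    · rw [PySem.List.pyRange_one_cons hab]
      refine List.pairwise_cons.mpr ⟨?_, ih (a+1) b (by omega)⟩
      intro x hx
      have := (PySem.List.mem_pyRange_one.mp hx).1
      omega
    · have : PySem.List.pyRange a b = [] := by
        apply List.eq_nil_iff_forall_not_mem.mpr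
        intro x hx
        have := PySem.List.mem_pyRange_one.mp hx
        omega
      simp [this]

theorem pyRange_sorted (a b : Int) : List.Pairwise (· ≤ ·) (PySem.List.pyRange a b) :=
  pyRange_sorted_aux (b - a).toNat a b le_rfl

-- unbounded dp depends only on the number of remaining positions: it is fcount
theorem pvDpA_false (target : Int) : ∀ (rest : List Int) (s : Int),
    pvDpA target rest false s = fcount rest.length (target - s) := by
  intro rest
  induction rest with
  | nil =>
    intro s
    simp only [pvDpA, fcount, List.length_nil]
    by_cases h : s = target <;> simp [h] <;> omega
  | cons dcur tail ih =>
    intro s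
    simp only [pvDpA]
    rw [pvDpInner_sum _ _ _ _ _ _ (pyRange_sorted _ _)]
    have h9 : (if false = true then dcur else 9) = (9:Int) := by simp
    rw [h9]
    have hr : PySem.List.pyRange 0 ((9:Int) + 1) = [0,1,2,3,4,5,6,7,8,9] := by decide
    rw [hr]
    simp only [Bool.false_and, List.map_cons, List.map_nil, List.sum_cons, List.sum_nil, ih]
    show _ = fcount (tail.length + 1) (target - s)
    simp only [fcount]
    have hr2 : List.range 10 = [0,1,2,3,4,5,6,7,8,9] := by decide
    simp only [hr2, List.map_cons, List.map_nil, List.sum_cons, List.sum_nil]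
    norm_num [sub_add_eq_sub_sub]

-- B's row with k convolutions applied: entry s is fcount k s
def rowOf (n k : Nat) : List Int := (List.range (9*n+1)).map (fun s : Nat => fcount k (s : Int))

theorem row0_eq (n : Nat) : (1 :: List.replicate (9*n) 0 : List Int) = rowOf n 0 := by
  unfold rowOf
  apply List.ext_getElem (by simp)
  intro i h1 h2
  match i with
  | 0 => simp [fcount]
  | (i+1) =>
    simp only [List.getElem_cons_succ, List.getElem_replicate, List.getElem_map,
      List.getElem_range]
    simp [fcount]
    omega

theorem rowOf_getD (n k : Nat) (r : Int) (h0 : 0 ≤ r) (h1 : r ≤ 9*(n:Int)) :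
    (rowOf n k).getD r.toNat 0 = fcount k r := by
  unfold rowOf
  rw [PySem.List.getD_map_range _ _ _ _ (by omega)]
  congr 1
  omega

theorem sum_map_filter (P : Int → Bool) (f : Int → Int) :
    ∀ l : List Int, ((l.filter P).map f).sum = (l.map (fun d => if P d then f d else 0)).sum := by
  intro l
  induction l with
  | nil => simp
  | cons x l ih =>
    by_cases hx : P x <;> simp [hx, ih]

theorem foldl_guard (tgt pref smax : Int) (row : List Int) (l : List Int) (acc : Int) :
    l.foldl (fun acc d => if 0 ≤ tgt - pref - d ∧ tgt - pref - d ≤ smax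
        then acc + row.getD (tgt - pref - d).toNat 0 else acc) acc
      = acc + (l.map (fun d => if 0 ≤ tgt - pref - d ∧ tgt - pref - d ≤ smax
        then row.getD (tgt - pref - d).toNat 0 else 0)).sum := by
  rw [PySem.List.foldl_congr_mem l _
    (fun acc d => acc + (if 0 ≤ tgt - pref - d ∧ tgt - pref - d ≤ smax
        then row.getD (tgt - pref - d).toNat 0 else 0)) acc
    (by
      intro a x _
      beta_reduce
      by_cases hx : 0 ≤ tgt - pref - x ∧ tgt - pref - x ≤ smax
      · rw [if_pos hx, if_pos hx]
      · rw [if_neg hx, if_neg hx, add_zero])]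
  exact PySem.List.foldl_add l _ acc

theorem row_update (n k : Nat) :
    (PySem.List.pyRange 0 (9*(n:Int)+1)).map (fun s =>
      ((PySem.List.pyRange 0 10).filter (fun d => 0 ≤ s - d)).foldl
        (fun acc d => acc + (rowOf n k).getD (s - d).toNat 0) 0) = rowOf n (k+1) := by
  have hcast : (9*(n:Int)+1) = ((9*n+1 : Nat) : Int) := by push_cast; ring
  rw [hcast, PySem.List.pyRange_zero_natCast, List.map_map]
  show _ = (List.range (9*n+1)).map (fun s : Nat => fcount (k+1) (s : Int))
  apply List.map_congr_left
  intro s hs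
  simp only [List.mem_range] at hs
  simp only [Function.comp_apply]
  rw [PySem.List.foldl_add, zero_add, sum_map_filter]
  have T : ∀ x : Int, x ≤ 9*(n:Int) →
      (if decide (0 ≤ x) = true then (rowOf n k).getD x.toNat 0 else 0) = fcount k x := by
    intro x hx
    by_cases h0 : 0 ≤ x
    · simp only [h0, decide_true, if_true]; exact rowOf_getD n k x h0 hx
    · simp only [h0, decide_false]; exact (fcount_neg k x (by omega)).symm
  have hsle : ((s:Int)) ≤ 9*(n:Int) := by
    have : s ≤ 9*n := by omega
    exact_mod_cast this
  have hr10 : PySem.List.pyRange 0 10 = [0,1,2,3,4,5,6,7,8,9] := by decide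
  rw [hr10]
  simp only [List.map_cons, List.map_nil, List.sum_cons, List.sum_nil]
  rw [T _ (by omega), T _ (by omega), T _ (by omega), T _ (by omega), T _ (by omega),
      T _ (by omega), T _ (by omega), T _ (by omega), T _ (by omega), T _ (by omega)]
  show _ = fcount (k+1) (s:Int)
  simp only [fcount]
  have hr2 : List.range 10 = [0,1,2,3,4,5,6,7,8,9] := by decide
  simp only [hr2, List.map_cons, List.map_nil, List.sum_cons, List.sum_nil]
  norm_num

-- the single right-to-left pass of B computes the bounded dp of A
theorem pvFold (target S : Int) (n : Nat) :
    ∀ rest : List Int, (∀ d ∈ rest, 0 ≤ d) → rest.length ≤ n →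
    List.foldl (pvStep target S (9*(n:Int)))
        (0, (1 :: List.replicate (9*n) 0 : List Int), (if S == target then 1 else 0 : Int))
        rest.reverse
      = (rest.sum, rowOf n rest.length, pvDpA target rest true (S - rest.sum)) := by
  intro rest
  induction rest with
  | nil =>
    intro _ _
    simp only [List.reverse_nil, List.foldl_nil, List.sum_nil, List.length_nil]
    rw [row0_eq]
    have : pvDpA target [] true (S - 0) = if S == target then 1 else 0 := by
      simp [pvDpA]
    rw [this]
  | cons dc tail ih =>
    intro hnn hlen
    have hdc : 0 ≤ dc := hnn dc (by simp)
    have hnt : ∀ d ∈ tail, 0 ≤ d := fun d hd => hnn d (by simp [hd])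
    have hlt : tail.length ≤ n := by simp at hlen; omega
    rw [List.reverse_cons, List.foldl_append, ih hnt hlt]
    simp only [pvStep, List.foldl_cons, List.foldl_nil, Prod.mk.injEq]
    refine ⟨?_, ?_, ?_⟩
    · show tail.sum + dc = (dc :: tail).sum
      simp [add_comm]
    · show _ = rowOf n (dc :: tail).length
      simp only [List.length_cons]
      exact row_update n tail.length
    · show _ = pvDpA target (dc :: tail) true (S - (dc :: tail).sum)
      -- unroll A at the head digit
      have hA : pvDpA target (dc :: tail) true (S - (dc :: tail).sum)
          = ((PySem.List.pyRange 0 dc).map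
              (fun d => fcount tail.length (target - (S - tail.sum - dc) - d))).sum
            + pvDpA target tail true (S - tail.sum) := by
        simp only [pvDpA]
        rw [pvDpInner_sum _ _ _ _ _ _ (pyRange_sorted _ _)]
        simp only [if_true]
        rw [PySem.List.pyRange_one_succ_right hdc, List.map_append, List.sum_append]
        congr 1
        · apply congrArg
          apply List.map_congr_left
          intro d hd
          have hdlt := (PySem.List.mem_pyRange_one.mp hd).2
          have hne : (d == dc) = false := by simp; omega
          rw [hne, Bool.true_and, pvDpA_false]
          congr 1
          simp only [List.sum_cons]
          ring
        · simp only [List.map_cons, List.map_nil, List.sum_cons, List.sum_nil, add_zero]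
          have harg : S - (dc + tail.sum) + dc = S - tail.sum := by ring
          rw [Bool.true_and, beq_self_eq_true, harg]
      rw [hA, foldl_guard]
      rw [add_comm]
      congr 1
      apply congrArg
      apply List.map_congr_left
      intro d hd
      have hdb := PySem.List.mem_pyRange_one.mp hd
      have hT : ∀ x : Int, (if 0 ≤ x ∧ x ≤ 9*(n:Int) then (rowOf n tail.length).getD x.toNat 0 else 0)
          = fcount tail.length x := by
        intro x
        by_cases h0 : 0 ≤ x ∧ x ≤ 9*(n:Int)
        · rw [if_pos h0]; exact rowOf_getD n tail.length x h0.1 h0.2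
        · rw [if_neg h0]
          rcases not_and_or.mp h0 with h | h
          · exact (fcount_neg _ _ (by omega)).symm
          · refine (fcount_gt _ _ ?_).symm
            have : (tail.length : Int) ≤ (n : Int) := by exact_mod_cast hlt
            omega
      rw [hT]

-- the memo dict only ever holds the reference dp values (keys name suffixes by length)
def pvMemoOK (target : Int) (digits : List Int) (memo : pvMemo) : Prop :=
  ∀ (l : Int) (b : Bool) (s v : Int), PySem.Dict.get? memo (l, b, s) = some v →
    ∀ rest : List Int, rest <:+ digits → (rest.length : Int) = l → v = pvDpA target rest b s

theorem suffix_eq_of_length {r1 r2 dl : List Int} (h1 : r1 <:+ dl) (h2 : r2 <:+ dl)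
    (h : r1.length = r2.length) : r1 = r2 := by
  obtain ⟨p1, hp1⟩ := h1
  obtain ⟨p2, hp2⟩ := h2
  have hp : p1 ++ r1 = p2 ++ r2 := by rw [hp1, hp2]
  have hl : p1.length = p2.length := by
    have := congrArg List.length hp
    simp at this
    omega
  exact List.append_inj_right hp hl

theorem pvMemoOK_empty (target : Int) (digits : List Int) :
    pvMemoOK target digits PySem.Dict.empty := by
  intro l b s v h
  simp [pysem] at h

theorem pvMemoOK_insert (target : Int) (digits rest : List Int) (b : Bool) (s : Int)
    (memo : pvMemo) (hok : pvMemoOK target digits memo) (hsuf : rest <:+ digits) :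
    pvMemoOK target digits
      (PySem.Dict.insert memo ((rest.length : Int), b, s) (pvDpA target rest b s)) := by
  intro l b' s' v hget rest' hsuf' hlen
  by_cases hk : ((l, b', s') : Int × Bool × Int) = ((rest.length : Int), b, s)
  · rw [hk, PySem.Dict.get?_insert_self] at hget
    simp only [Prod.mk.injEq] at hk
    obtain ⟨h1, h2, h3⟩ := hk
    subst h2; subst h3
    have : rest' = rest := suffix_eq_of_length hsuf' hsuf (by omega)
    rw [this]
    exact (Option.some.injEq .. ▸ hget).symm
  · rw [PySem.Dict.get?_insert_of_ne _ _ hk] at hget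
    exact hok l b' s' v hget rest' hsuf' hlen

theorem pvDpAM_correct (target : Int) (digits : List Int) :
    ∀ rest : List Int, rest <:+ digits →
    ∀ (b : Bool) (s : Int) (memo : pvMemo), pvMemoOK target digits memo →
      (pvDpAM target rest b s memo).1 = pvDpA target rest b s ∧
      pvMemoOK target digits (pvDpAM target rest b s memo).2 := by
  intro rest
  induction rest with
  | nil =>
    intro hsuf b s memo hok
    rw [pvDpAM]
    cases hget : PySem.Dict.get? memo (((List.length ([] : List Int) : Nat) : Int), b, s) with
    | some v =>
      simp only
      exact ⟨hok _ b s v hget [] hsuf rfl, hok⟩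
    | none =>
      simp only
      refine ⟨by simp [pvDpA], ?_⟩
      have h0 : (if s == target then (1:Int) else 0) = pvDpA target [] b s := by simp [pvDpA]
      rw [h0]
      exact pvMemoOK_insert target digits [] b s memo hok hsuf
  | cons dc tail ih =>
    intro hsuf b s memo hok
    have htail : tail <:+ digits := (List.suffix_cons dc tail).trans hsuf
    have hinner : ∀ (b' : Bool) (s' m : Int) (ds : List Int) (memo : pvMemo),
        pvMemoOK target digits memo →
        (pvDpInnerM target tail b' s' m ds memo).1 = pvDpInner target tail b' s' m ds ∧
        pvMemoOK target digits (pvDpInnerM target tail b' s' m ds memo).2 := by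
      intro b' s' m ds
      induction ds with
      | nil => intro memo hok; rw [pvDpInnerM]; exact ⟨by simp [pvDpInner], hok⟩
      | cons d ds' ihds =>
        intro memo hok
        rw [pvDpInnerM]
        by_cases hbr : s' + d > target
        · rw [if_pos hbr]
          exact ⟨by rw [pvDpInner, if_pos hbr], hok⟩
        · rw [if_neg hbr]
          obtain ⟨h1, hok1⟩ := ih htail (b' && (d == m)) (s' + d) memo hok
          obtain ⟨h2, hok2⟩ := ihds _ hok1
          refine ⟨?_, hok2⟩
          simp only
          rw [h1, h2, pvDpInner, if_neg hbr]
    rw [pvDpAM]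
    cases hget : PySem.Dict.get? memo (((dc :: tail).length : Int), b, s) with
    | some v =>
      simp only
      exact ⟨hok _ b s v hget (dc :: tail) hsuf rfl, hok⟩
    | none =>
      simp only
      obtain ⟨h1, hok1⟩ := hinner b s (if b then dc else 9) (PySem.List.pyRange 0 ((if b then dc else 9) + 1)) memo hok
      have hval : pvDpInner target tail b s (if b then dc else 9)
          (PySem.List.pyRange 0 ((if b then dc else 9) + 1)) = pvDpA target (dc :: tail) b s := by
        rw [pvDpA]
      refine ⟨by rw [h1, hval], ?_⟩
      rw [h1, hval]
      exact pvMemoOK_insert target digits (dc :: tail) b s _ hok1 hsuf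

-- ===== VERDICT (by name: the statement is the Claim_ definition above) =====
theorem countNumbers_2_spec : Claim_equal_countNumbers_2 := by
  intro num target _ _
  unfold Spec_countNumbers_2 countNumbers_2 countNumbers_2_alt
  rw [(pvDpAM_correct target (pvDigits num) (pvDigits num) (List.suffix_refl _) true 0
      PySem.Dict.empty (pvMemoOK_empty target (pvDigits num))).1]
  have hnn : ∀ d ∈ pvDigits num, 0 ≤ d := by
    intro d hd
    unfold pvDigits at hd
    simp only [List.mem_map] at hd
    obtain ⟨c, _, rfl⟩ := hd
    exact pvDigit_nonneg c
  show pvDpA target (pvDigits num) true 0 =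
    (List.foldl (pvStep target ((pvDigits num).sum) (9*((pvDigits num).length : Int)))
      (0, (1 :: List.replicate (9*(pvDigits num).length) 0 : List Int),
        (if (pvDigits num).sum == target then 1 else 0 : Int)) (pvDigits num).reverse).2.2
  rw [pvFold target (pvDigits num).sum (pvDigits num).length (pvDigits num) hnn le_rfl]
  rw [sub_self]
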